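-- pv_equiv track=rewrite | github.com/slimebob1975/JBGLangImprover | app/src/JBGChangePlanner.py | _normalized_char_map
-- ===== SOURCE A (Python) =====
-- def _normalized_char_map(text: str) -> list[tuple[int, str]]:
--     result: list[tuple[int, str]] = []
--     previous_was_space = False
--
--     for i, ch in enumerate(text.replace("\u00a0", " ")):
--         if ch.isspace():
--             if not previous_was_space:
--                 result.append((i, " "))
--             previous_was_space = True
--         else:
--             result.append((i, ch))
--             previous_was_space = False
--
--     while result and result[0][1] == " ":
--         result.pop(0)
--     while result and result[-1][1] == " ":
--         result.pop()
--
--     return result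
-- ===== SOURCE B (Python) =====
-- def _normalized_char_map(text: str) -> list[tuple[int, str]]:
--     # Declarative/stateless formulation: after normalizing NBSP, a position i
--     # survives iff it holds a non-space character, or it holds whitespace that
--     # immediately follows a non-space and lies strictly before the last
--     # non-space (so collapsed runs keep their first index and leading/trailing
--     # whitespace never enters the result).  No state machine, no strip passes.
--     norm = text.replace("\u00a0", " ")
--     last = len(norm.rstrip()) - 1
--     return [(i, " " if c.isspace() else c)
--             for i, c in enumerate(norm)
--             if not c.isspace() or (0 < i and i < last and not norm[i - 1].isspace())]
-- ===== Notes on version B (the rewrite author's own statement) =====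
-- stated objective: alternative
-- what changed: Replaces A's stateful previous_was_space scan plus two end-trimming pop loops by a single stateless closed-form membership predicate: keep position i iff it is non-space, or it is whitespace immediately preceded by a non-space and strictly before the last non-space index (computed once via rstrip); nothing is ever appended and later removed.
import Mathlib
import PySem

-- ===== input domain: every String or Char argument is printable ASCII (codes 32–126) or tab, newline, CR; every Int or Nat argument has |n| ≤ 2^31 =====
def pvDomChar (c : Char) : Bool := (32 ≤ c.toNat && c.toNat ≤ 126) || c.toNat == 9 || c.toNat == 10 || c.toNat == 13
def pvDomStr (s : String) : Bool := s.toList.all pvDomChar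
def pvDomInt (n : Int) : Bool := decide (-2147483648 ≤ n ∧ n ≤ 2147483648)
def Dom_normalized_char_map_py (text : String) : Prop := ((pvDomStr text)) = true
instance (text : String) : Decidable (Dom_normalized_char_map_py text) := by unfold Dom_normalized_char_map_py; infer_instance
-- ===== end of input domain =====

-- B replaces A's stateful previous_was_space scan plus two trimming pop loops by a single
-- stateless filter with a closed-form keep-predicate; objective: alternative.

-- ===== PORT A =====
-- text.replace("\u00a0", " ") — a single-char-for-single-char replace, exactly a character map
def pyNormalize (text : String) : List Char :=
  text.toList.map (fun c => if c = '\u00a0' then ' ' else c)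

-- the `for i, ch in enumerate(...)` loop with its result accumulator and previous_was_space flag
def aLoop : List (Int × Char) → List (Int × String) → Bool → List (Int × String)
  | [], res, _ => res
  | (i, ch) :: rest, res, prev =>
    if PySem.Chars.isspace ch then
      aLoop rest (if !prev then res ++ [(i, " ")] else res) true
    else
      aLoop rest (res ++ [(i, ch.toString)]) false

-- `while result and result[0][1] == " ": result.pop(0)`
def aStripFront : List (Int × String) → List (Int × String)
  | [] => []
  | (i, s) :: rest => if s = " " then aStripFront rest else (i, s) :: rest

-- `while result and result[-1][1] == " ": result.pop()`
def aStripBack (l : List (Int × String)) : List (Int × String) :=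
  match h : l.getLast? with
  | some p => if p.2 = " " then aStripBack l.dropLast else l
  | none => l
termination_by l.length
decreasing_by
  have hne : l ≠ [] := by intro e; subst e; simp at h
  have : 0 < l.length := List.length_pos_iff.mpr hne
  simp [List.length_dropLast]; omega

def normalized_char_map_py (text : String) : List (Int × String) :=
  aStripBack (aStripFront (aLoop (PySem.List.enumerate (pyNormalize text) 0) [] false))

-- ===== PORT B =====
-- the comprehension's keep-condition:
-- `not c.isspace() or (0 < i and i < last and not norm[i - 1].isspace())`
def bKeep (norm : List Char) (last : Int) (p : Int × Char) : Bool :=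
  !PySem.Chars.isspace p.2 ||
    (decide ((0:Int) < p.1) && decide (p.1 < last) &&
      ((PySem.List.pyGet? norm (p.1 - 1)).elim false (fun d => !PySem.Chars.isspace d)))

def normalized_char_map_py_alt (text : String) : List (Int × String) :=
  let norm := pyNormalize text
  -- `last = len(norm.rstrip()) - 1`
  let last : Int := ((PySem.Chars.rstrip norm).length : Int) - 1
  -- the list comprehension: filter the kept positions, emit " " for whitespace
  ((PySem.List.enumerate norm 0).filter (bKeep norm last)).map
    (fun p => (p.1, if PySem.Chars.isspace p.2 then " " else p.2.toString))

-- ===== PRECONDITION & SPEC =====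
def Spec_normalized_char_map_py (text : String) (out : List (Int × String)) : Prop := out = normalized_char_map_py_alt text
instance (text : String) (out : List (Int × String)) : Decidable (Spec_normalized_char_map_py text out) := by unfold Spec_normalized_char_map_py; infer_instance

-- ===== CLAIM (what is proved, stated in full; the proofs are below) =====
def Claim_equal_normalized_char_map_py : Prop := ∀ (text : String), Dom_normalized_char_map_py text → Spec_normalized_char_map_py text (normalized_char_map_py text)

-- ===== LEMMAS AND PROOFS =====

-- `last` as B computes it: index of the last non-whitespace character, -1 if none
def lastNS (norm : List Char) : Int := ((PySem.Chars.rstrip norm).length : Int) - 1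

-- the value a kept position contributes
def pvV (p : Int × Char) : Int × String :=
  (p.1, if PySem.Chars.isspace p.2 then " " else p.2.toString)

-- B's output restricted to positions ≥ i
def pvMID (norm : List Char) (i : Nat) : List (Int × String) :=
  ((PySem.List.enumerate (norm.drop i) i).filter (bKeep norm (lastNS norm))).map pvV

-- the one trailing space tuple A builds and then pops again (present for suffixes reaching it)
def pvTRAIL (norm : List Char) (i : Nat) : List (Int × String) :=
  if 0 ≤ lastNS norm ∧ lastNS norm + 1 < norm.length ∧ (i : Int) ≤ lastNS norm + 1
  then [(lastNS norm + 1, " ")] else []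

-- the one leading space tuple A builds and then pops again
def pvHEAD (norm : List Char) : List (Int × String) :=
  if h : 0 < norm.length then
    (if PySem.Chars.isspace norm[0] then [((0:Int), " ")] else []) else []

theorem pv_R1 (norm : List Char) (j : Nat) (hj : j < norm.length)
    (h : lastNS norm < (j : Int)) : PySem.Chars.isspace norm[j] = true := by
  have hsplit : List.takeWhile PySem.Chars.isspace norm.reverse ++
      List.dropWhile PySem.Chars.isspace norm.reverse = norm.reverse :=
    List.takeWhile_append_dropWhile
  have hlen := congrArg List.length hsplit
  simp only [List.length_append, List.length_reverse] at hlen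
  have hr : (PySem.Chars.rstrip norm).length =
      (List.dropWhile PySem.Chars.isspace norm.reverse).length := by
    simp [PySem.Chars.rstrip]
  unfold lastNS at h
  rw [hr] at h
  have hjr : (List.dropWhile PySem.Chars.isspace norm.reverse).length ≤ j := by omega
  have hidx : norm.length - 1 - j < (List.takeWhile PySem.Chars.isspace norm.reverse).length := by
    omega
  have hget : norm[j] = (List.takeWhile PySem.Chars.isspace norm.reverse ++
      List.dropWhile PySem.Chars.isspace norm.reverse)[norm.length - 1 - j]'(by
        rw [hsplit]; simp; omega) := by
    rw [List.getElem_of_eq hsplit, List.getElem_reverse]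
    congr 1
    omega
  rw [List.getElem_append_left hidx] at hget
  exact List.mem_takeWhile_imp (hget ▸ List.getElem_mem hidx)

theorem pv_R2 (norm : List Char) (h : 0 ≤ lastNS norm) :
    ∃ hN : (lastNS norm).toNat < norm.length,
      PySem.Chars.isspace (norm[(lastNS norm).toNat]'hN) = false := by
  have hsplit : List.takeWhile PySem.Chars.isspace norm.reverse ++
      List.dropWhile PySem.Chars.isspace norm.reverse = norm.reverse :=
    List.takeWhile_append_dropWhile
  have hlen := congrArg List.length hsplit
  simp only [List.length_append, List.length_reverse] at hlen
  have hr : (PySem.Chars.rstrip norm).length =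
      (List.dropWhile PySem.Chars.isspace norm.reverse).length := by
    simp [PySem.Chars.rstrip]
  unfold lastNS at h ⊢
  rw [hr] at h ⊢
  set r := List.dropWhile PySem.Chars.isspace norm.reverse with hrdef
  have hr1 : 1 ≤ r.length := by omega
  have htn : ((r.length : Int) - 1).toNat = r.length - 1 := by omega
  have hN : ((r.length : Int) - 1).toNat < norm.length := by omega
  refine ⟨hN, ?_⟩
  have hrne : r ≠ [] := by
    intro e; rw [e] at hr1; simp at hr1
  have hget : norm[((r.length : Int) - 1).toNat]'hN =
      (List.takeWhile PySem.Chars.isspace norm.reverse ++ r)[norm.length - r.length]'(by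
        rw [hsplit]; simp; omega) := by
    rw [List.getElem_of_eq hsplit, List.getElem_reverse]
    congr 1
    omega
  rw [List.getElem_append_right (by omega)] at hget
  have hhead : r.head hrne = norm[((r.length : Int) - 1).toNat]'hN := by
    rw [List.head_eq_getElem, hget]
    congr 1
    omega
  rw [← hhead]
  exact List.head_dropWhile_not PySem.Chars.isspace hrne

theorem pvMID_cons (norm : List Char) (i : Nat) (h : i < norm.length) :
    pvMID norm i =
      (if bKeep norm (lastNS norm) ((i : Int), norm[i]) then [pvV ((i : Int), norm[i])] else [])
        ++ pvMID norm (i + 1) := by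
  unfold pvMID
  rw [List.drop_eq_getElem_cons h, PySem.List.enumerate_cons, List.filter_cons]
  have hc : ((i : Int) + 1) = ((i + 1 : Nat) : Int) := by push_cast; ring
  rw [hc]
  split_ifs <;> simp

theorem pvMID_empty_aux (norm : List Char) :
    ∀ (k i : Nat), norm.length - i ≤ k → lastNS norm < (i : Int) → pvMID norm i = [] := by
  intro k
  induction k with
  | zero =>
    intro i hk _
    unfold pvMID
    rw [List.drop_eq_nil_of_le (by omega)]
    simp [PySem.List.enumerate_nil]
  | succ k ih =>
    intro i hk hlt
    by_cases hi : i < norm.length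
    · rw [pvMID_cons norm i hi]
      have hsp := pv_R1 norm i hi hlt
      have hb : bKeep norm (lastNS norm) ((i : Int), norm[i]) = false := by
        simp [bKeep, hsp]
        omega
      rw [hb]
      simp only [Bool.false_eq_true, if_false, List.nil_append]
      exact ih (i + 1) (by omega) (by push_cast; omega)
    · unfold pvMID
      rw [List.drop_eq_nil_of_le (by omega)]
      simp [PySem.List.enumerate_nil]

theorem pvMID_empty (norm : List Char) (i : Nat) (h : lastNS norm < (i : Int)) :
    pvMID norm i = [] :=
  pvMID_empty_aux norm norm.length i (by omega) h

theorem pv_BIG_end (norm : List Char) (i : Nat) (hiN : norm.length ≤ i)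
    (res : List (Int × String)) (prev : Bool) :
    aLoop (PySem.List.enumerate (norm.drop i) i) res prev =
      res ++ (if i = 0 then pvHEAD norm else []) ++ pvMID norm i ++ pvTRAIL norm i := by
  have hmid : pvMID norm i = [] := by
    unfold pvMID
    rw [List.drop_eq_nil_of_le hiN]
    simp [PySem.List.enumerate_nil]
  have htr : pvTRAIL norm i = [] := by
    unfold pvTRAIL
    rw [if_neg]
    intro hcond
    have h1 : lastNS norm + 1 < (norm.length : Int) := by exact_mod_cast hcond.2.1
    have h2 : (i : Int) ≤ lastNS norm + 1 := hcond.2.2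
    omega
  have hhd : (if i = 0 then pvHEAD norm else []) = [] := by
    split_ifs with h0
    · unfold pvHEAD
      rw [dif_neg]
      omega
    · rfl
  rw [List.drop_eq_nil_of_le hiN, PySem.List.enumerate_nil, hmid, htr, hhd]
  simp [aLoop]

theorem pv_BIG (norm : List Char) :
    ∀ (k i : Nat), norm.length - i ≤ k → i ≤ norm.length →
    ∀ (res : List (Int × String)) (prev : Bool),
    (i = 0 → prev = false) →
    (∀ (h : 0 < i) (h2 : i ≤ norm.length), prev = PySem.Chars.isspace (norm[i-1]'(by omega))) →
    aLoop (PySem.List.enumerate (norm.drop i) i) res prev =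
      res ++ (if i = 0 then pvHEAD norm else []) ++ pvMID norm i ++ pvTRAIL norm i := by
  intro k
  induction k with
  | zero =>
    intro i hk hiN res prev _ _
    exact pv_BIG_end norm i (by omega) res prev
  | succ k ih =>
    intro i hk hiN res prev hp0 hp1
    by_cases hi : i < norm.length
    · rw [List.drop_eq_getElem_cons hi, PySem.List.enumerate_cons]
      have hc1 : ((i : Int) + 1) = ((i + 1 : Nat) : Int) := by push_cast; ring
      by_cases hsp : PySem.Chars.isspace norm[i] = true
      · -- whitespace character
        cases prev with
        | true =>
          have hi0 : i ≠ 0 := by intro e; exact absurd (hp0 e) (by simp)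
          have hpv : PySem.Chars.isspace (norm[i-1]'(by omega)) = true :=
            (hp1 (by omega) (by omega)).symm
          simp only [aLoop, hsp, if_true, Bool.not_true, Bool.false_eq_true, if_false]
          rw [hc1, ih (i+1) (by omega) (by omega) res true (by omega) (fun _ _ => by simp [hsp])]
          have hpg : PySem.List.pyGet? norm ((i : Int) - 1) = some (norm[i-1]'(by omega)) := by
            have he : ((i : Int) - 1) = ((i - 1 : Nat) : Int) := by omega
            rw [he, PySem.List.pyGet?_natCast, List.getElem?_eq_getElem (by omega)]
          have hb : bKeep norm (lastNS norm) ((i : Int), norm[i]) = false := by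
            simp [bKeep, hsp, hpg, hpv]
          have hmid : pvMID norm i = pvMID norm (i+1) := by
            rw [pvMID_cons norm i hi, hb]; simp
          have htr : pvTRAIL norm i = pvTRAIL norm (i+1) := by
            unfold pvTRAIL
            split_ifs with h1 h2 h2
            · rfl
            · exfalso
              push_cast at h1 h2
              have h0l : 0 ≤ lastNS norm := h1.1
              obtain ⟨hN2, hns⟩ := pv_R2 norm h0l
              have hgeq : norm[(lastNS norm).toNat]'hN2 = norm[i-1]'(by omega) := by
                congr 1
                omega
              rw [hgeq] at hns
              rw [hns] at hpv
              exact absurd hpv (by simp)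
            · exfalso; push_cast at h1 h2; omega
            · rfl
          rw [hmid, htr]
          simp [hi0]
        | false =>
          simp only [aLoop, hsp, if_true, Bool.not_false]
          rw [hc1, ih (i+1) (by omega) (by omega) (res ++ [((i : Int), " ")]) true
            (by omega) (fun _ _ => by simp [hsp])]
          by_cases hi0 : i = 0
          · subst hi0
            have hhead : pvHEAD norm = [((0 : Int), " ")] := by
              unfold pvHEAD
              rw [dif_pos hi, if_pos hsp]
            have hb : bKeep norm (lastNS norm) (((0 : Nat) : Int), norm[0]) = false := by
              simp [bKeep, hsp]
            have hmid : pvMID norm 0 = pvMID norm 1 := by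
              rw [pvMID_cons norm 0 hi, hb]; simp
            have htr : pvTRAIL norm 0 = pvTRAIL norm 1 := by
              unfold pvTRAIL
              split_ifs with h1 h2 h2 <;> try rfl
              · exfalso; push_cast at h1 h2; omega
              · exfalso; push_cast at h1 h2; omega
            rw [hmid, htr]
            simp [hhead]
          · have hpv : PySem.Chars.isspace (norm[i-1]'(by omega)) = false :=
              (hp1 (by omega) (by omega)).symm
            have hpg : PySem.List.pyGet? norm ((i : Int) - 1) = some (norm[i-1]'(by omega)) := by
              have he : ((i : Int) - 1) = ((i - 1 : Nat) : Int) := by omega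
              rw [he, PySem.List.pyGet?_natCast, List.getElem?_eq_getElem (by omega)]
            rcases lt_or_ge ((i : Int)) (lastNS norm) with hlt | hge
            · have hb : bKeep norm (lastNS norm) ((i : Int), norm[i]) = true := by
                simp [bKeep, hsp, hpg, hpv, hlt]
                omega
              have hmid : pvMID norm i = ((i : Int), " ") :: pvMID norm (i+1) := by
                rw [pvMID_cons norm i hi, hb]; simp [pvV, hsp]
              have htr : pvTRAIL norm i = pvTRAIL norm (i+1) := by
                unfold pvTRAIL
                split_ifs with h1 h2 h2 <;> try rfl
                · exfalso; push_cast at h1 h2; omega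
                · exfalso; push_cast at h1 h2; omega
              rw [hmid, htr]
              simp [hi0]
            · have hgt : lastNS norm < (i : Int) := by
                rcases eq_or_lt_of_le hge with he | hlt2
                · exfalso
                  have h0l : 0 ≤ lastNS norm := by omega
                  obtain ⟨hN2, hns⟩ := pv_R2 norm h0l
                  have hgeq : norm[(lastNS norm).toNat]'hN2 = norm[i]'hi := by
                    congr 1
                    omega
                  rw [hgeq] at hns
                  rw [hns] at hsp
                  exact absurd hsp (by simp)
                · exact hlt2
              have hle : (i : Int) ≤ lastNS norm + 1 := by
                by_contra hcon
                have hj := pv_R1 norm (i-1) (by omega) (by omega)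
                rw [hj] at hpv
                exact absurd hpv (by simp)
              have hEq : (i : Int) = lastNS norm + 1 := by omega
              have h0l : 0 ≤ lastNS norm := by omega
              have htr_i : pvTRAIL norm i = [((i : Int), " ")] := by
                unfold pvTRAIL
                rw [if_pos ⟨h0l, by omega, by omega⟩, ← hEq]
              have htr_i1 : pvTRAIL norm (i+1) = [] := by
                unfold pvTRAIL
                rw [if_neg]
                push_cast
                omega
              have hb : bKeep norm (lastNS norm) ((i : Int), norm[i]) = false := by
                simp [bKeep, hsp]
                omega
              have hmid : pvMID norm i = pvMID norm (i+1) := by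
                rw [pvMID_cons norm i hi, hb]; simp
              have hmidnil : pvMID norm (i+1) = [] := pvMID_empty norm (i+1) (by push_cast; omega)
              rw [htr_i1, hmid, hmidnil, htr_i]
              simp [hi0]
      · -- non-space character
        rw [Bool.not_eq_true] at hsp
        simp only [aLoop, hsp, Bool.false_eq_true, if_false]
        rw [hc1, ih (i+1) (by omega) (by omega) (res ++ [((i : Int), norm[i].toString)]) false
          (fun _ => rfl) (fun _ _ => by simp [hsp])]
        have hb : bKeep norm (lastNS norm) ((i : Int), norm[i]) = true := by
          simp [bKeep, hsp]
        have hmid : pvMID norm i = ((i : Int), norm[i].toString) :: pvMID norm (i+1) := by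
          rw [pvMID_cons norm i hi, hb]; simp [pvV, hsp]
        have htr : pvTRAIL norm i = pvTRAIL norm (i+1) := by
          unfold pvTRAIL
          split_ifs with h1 h2 h2 <;> try rfl
          · exfalso
            have hj := pv_R1 norm i hi (by push_cast at h1 h2 ⊢; omega)
            rw [hj] at hsp
            exact absurd hsp (by simp)
          · exfalso; push_cast at h1 h2; omega
        have hhd : (if i = 0 then pvHEAD norm else []) = [] := by
          split_ifs with h0
          · subst h0
            unfold pvHEAD
            rw [dif_pos hi, if_neg (by simp [hsp])]
          · rfl
        rw [hmid, htr, hhd]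
        simp
    · exact pv_BIG_end norm i (by omega) res prev

theorem toString_ne_space {c : Char} (hc : PySem.Chars.isspace c = false) :
    c.toString ≠ " " := by
  intro h
  have hc' : c = ' ' := by
    have := congrArg String.toList h
    simpa using this
  subst hc'
  simp [PySem.Chars.isspace] at hc

theorem pv_S1_aux (norm : List Char) :
    ∀ (k i : Nat), norm.length - i ≤ k →
    (∀ j, j < i → ∀ hj : j < norm.length, PySem.Chars.isspace norm[j] = true) →
    pvMID norm i = [] ∨ ∃ p t, pvMID norm i = p :: t ∧ p.2 ≠ " " := by
  intro k
  induction k with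
  | zero =>
    intro i hk _
    left
    unfold pvMID
    rw [List.drop_eq_nil_of_le (by omega)]
    simp [PySem.List.enumerate_nil]
  | succ k ih =>
    intro i hk hall
    by_cases hi : i < norm.length
    · by_cases hsp : PySem.Chars.isspace norm[i] = true
      · have hb : bKeep norm (lastNS norm) ((i : Int), norm[i]) = false := by
          by_cases hi0 : i = 0
          · subst hi0; simp [bKeep, hsp]
          · have hpg : PySem.List.pyGet? norm ((i : Int) - 1) = some (norm[i-1]'(by omega)) := by
              have he : ((i : Int) - 1) = ((i - 1 : Nat) : Int) := by omega
              rw [he, PySem.List.pyGet?_natCast, List.getElem?_eq_getElem (by omega)]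
            have hpv := hall (i-1) (by omega) (by omega)
            simp [bKeep, hsp, hpg, hpv]
        have hmid : pvMID norm i = pvMID norm (i+1) := by
          rw [pvMID_cons norm i hi, hb]; simp
        rw [hmid]
        refine ih (i+1) (by omega) ?_
        intro j hj hjN
        rcases Nat.lt_or_ge j i with hji | hji
        · exact hall j hji hjN
        · have : j = i := by omega
          subst this
          exact hsp
      · rw [Bool.not_eq_true] at hsp
        have hb : bKeep norm (lastNS norm) ((i : Int), norm[i]) = true := by
          simp [bKeep, hsp]
        right
        refine ⟨((i : Int), norm[i].toString), pvMID norm (i+1), ?_, toString_ne_space hsp⟩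
        rw [pvMID_cons norm i hi, hb]
        simp [pvV, hsp]
    · left
      unfold pvMID
      rw [List.drop_eq_nil_of_le (by omega)]
      simp [PySem.List.enumerate_nil]

theorem pv_S1 (norm : List Char) :
    pvMID norm 0 = [] ∨ ∃ p t, pvMID norm 0 = p :: t ∧ p.2 ≠ " " :=
  pv_S1_aux norm norm.length 0 (by omega) (fun j hj _ => absurd hj (by omega))

theorem pv_S2 (norm : List Char) (h : pvMID norm 0 = []) : pvTRAIL norm 0 = [] := by
  unfold pvTRAIL
  rw [if_neg]
  intro hcond
  obtain ⟨h0l, hlN, _⟩ := hcond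
  obtain ⟨hN2, hns⟩ := pv_R2 norm h0l
  unfold pvMID at h
  rw [List.map_eq_nil_iff, List.filter_eq_nil_iff] at h
  have hmem : ((lastNS norm), norm[(lastNS norm).toNat]'hN2) ∈
      PySem.List.enumerate (norm.drop 0) ((0 : Nat) : Int) := by
    rw [PySem.List.mem_enumerate_iff]
    exact ⟨(lastNS norm).toNat, by simpa using hN2, by simp; omega⟩
  have hkeep : bKeep norm (lastNS norm) ((lastNS norm), norm[(lastNS norm).toNat]'hN2) = true := by
    simp [bKeep, hns]
  exact absurd hkeep (by simpa using h _ hmem)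

theorem pv_S3 (norm : List Char) :
    ∀ (k i : Nat), norm.length - i ≤ k → (i : Int) ≤ lastNS norm →
    ∃ q, (pvMID norm i).getLast? = some q ∧ q.2 ≠ " " := by
  intro k
  induction k with
  | zero =>
    intro i hk hle
    exfalso
    have h0l : 0 ≤ lastNS norm := le_trans (by omega) hle
    obtain ⟨hN2, _⟩ := pv_R2 norm h0l
    omega
  | succ k ih =>
    intro i hk hle
    have h0l : 0 ≤ lastNS norm := le_trans (by omega) hle
    obtain ⟨hN2, hns⟩ := pv_R2 norm h0l
    have hi : i < norm.length := by omega
    rcases eq_or_lt_of_le hle with heq | hlt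
    · -- i is the last non-space position
      have hgeq : norm[(lastNS norm).toNat]'hN2 = norm[i]'hi := by
        congr 1
        omega
      rw [hgeq] at hns
      have hb : bKeep norm (lastNS norm) ((i : Int), norm[i]) = true := by
        simp [bKeep, hns]
      have hmidnil : pvMID norm (i+1) = [] := pvMID_empty norm (i+1) (by push_cast; omega)
      refine ⟨((i : Int), norm[i].toString), ?_, toString_ne_space hns⟩
      rw [pvMID_cons norm i hi, hb, hmidnil]
      simp [pvV, hns]
    · obtain ⟨q, hq, hqs⟩ := ih (i+1) (by omega) (by push_cast; omega)
      refine ⟨q, ?_, hqs⟩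
      rw [pvMID_cons norm i hi]
      rw [List.getLast?_append_of_ne_nil _ (by
        intro e
        rw [e] at hq
        simp at hq)]
      exact hq

theorem alt_eq (text : String) :
    normalized_char_map_py_alt text = pvMID (pyNormalize text) 0 := rfl

theorem aStripFront_space_cons (i : Int) (l : List (Int × String)) :
    aStripFront ((i, " ") :: l) = aStripFront l := by
  simp [aStripFront]

theorem aStripFront_cons_ne {p : Int × String} {l : List (Int × String)} (hp : p.2 ≠ " ") :
    aStripFront (p :: l) = p :: l := by
  obtain ⟨i, s⟩ := p
  simp only [aStripFront]
  rw [if_neg hp]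

theorem aStripBack_nil : aStripBack ([] : List (Int × String)) = [] := by
  rw [aStripBack]
  split
  next p heq => simp at heq
  next => rfl

theorem aStripBack_ne (l : List (Int × String))
    (h : ∀ q, l.getLast? = some q → q.2 ≠ " ") : aStripBack l = l := by
  rw [aStripBack]
  split
  next p heq => rw [if_neg (h p heq)]
  next => rfl

theorem aStripBack_concat_space (l : List (Int × String)) (i : Int) :
    aStripBack (l ++ [(i, " ")]) = aStripBack l := by
  rw [aStripBack]
  split
  next p heq =>
    rw [List.getLast?_concat] at heq
    cases heq
    rw [if_pos rfl, List.dropLast_concat]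
  next heq =>
    rw [List.getLast?_concat] at heq
    exact absurd heq (by simp)

-- ===== VERDICT (by name: the statement is the Claim_ definition above) =====
theorem normalized_char_map_py_spec : Claim_equal_normalized_char_map_py := by
  intro text _
  unfold Spec_normalized_char_map_py
  rw [alt_eq]
  unfold normalized_char_map_py
  set norm := pyNormalize text with hn
  have hloop := pv_BIG norm norm.length 0 (by omega) (by omega) [] false (fun _ => rfl)
    (fun h _ => absurd h (by omega))
  rw [List.drop_zero, Nat.cast_zero] at hloop
  rw [hloop, if_pos rfl, List.nil_append]
  rcases pv_S1 norm with hnil | ⟨p, t, hcons, hp⟩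
  · rw [hnil, pv_S2 norm hnil, List.append_nil, List.append_nil]
    unfold pvHEAD
    split_ifs with h1 h2
    · rw [aStripFront_space_cons]
      simp [aStripFront, aStripBack_nil]
    · simp [aStripFront, aStripBack_nil]
    · simp [aStripFront, aStripBack_nil]
  · have hfront : aStripFront ((pvHEAD norm ++ pvMID norm 0) ++ pvTRAIL norm 0) =
        pvMID norm 0 ++ pvTRAIL norm 0 := by
      rw [List.append_assoc, hcons, List.cons_append]
      unfold pvHEAD
      split_ifs with h1 h2
      · rw [List.singleton_append, aStripFront_space_cons, aStripFront_cons_ne hp]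
      · rw [List.nil_append, aStripFront_cons_ne hp]
      · rw [List.nil_append, aStripFront_cons_ne hp]
    rw [hfront]
    have h0l : 0 ≤ lastNS norm := by
      by_contra hneg
      rw [pvMID_empty norm 0 (by omega)] at hcons
      simp at hcons
    obtain ⟨q, hq, hqs⟩ := pv_S3 norm norm.length 0 (by omega) (by simpa using h0l)
    have hback : aStripBack (pvMID norm 0) = pvMID norm 0 :=
      aStripBack_ne _ (fun r hr => by rw [hq] at hr; cases hr; exact hqs)
    unfold pvTRAIL
    split_ifs with h1
    · rw [aStripBack_concat_space, hback]
    · rw [List.append_nil, hback]
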